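-- pv_equiv track=rewrite | github.com/saundershayes/mahimahi | youtube_data_analysis.py | get_byte_range
-- ===== SOURCE A (Python) =====
-- def get_byte_range(time_range, time_byte_mapping):
-- 	time_start = str(time_range[0])
-- 	time_end = str(time_range[1])
-- 	bytes_start = -1
-- 	bytes_end = -1
-- 	for mapping_tup in time_byte_mapping:
-- 		if time_start == mapping_tup[1]:
-- 			bytes_start = mapping_tup[0]
-- 		if time_end == mapping_tup[1]:
-- 			bytes_end = mapping_tup[0]
-- 			break
-- 	return (bytes_start, bytes_end)
-- ===== SOURCE B (Python) =====
-- def get_byte_range(time_range, time_byte_mapping):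
--     time_start = str(time_range[0])
--     time_end = str(time_range[1])
--     # Pass 1: locate the first tuple matching the end time.
--     bytes_end = -1
--     prefix = time_byte_mapping
--     for i, tup in enumerate(time_byte_mapping):
--         if tup[1] == time_end:
--             bytes_end = tup[0]
--             prefix = time_byte_mapping[:i + 1]
--             break
--     # Pass 2: last start match within the prefix = first match scanning backwards.
--     bytes_start = -1
--     for tup in reversed(prefix):
--         if tup[1] == time_start:
--             bytes_start = tup[0]
--             break
--     return (bytes_start, bytes_end)
-- ===== Notes on version B (the rewrite author's own statement) =====
-- stated objective: alternative
-- what changed: Replaces A's single interleaved break-driven loop (which tracks both offsets at once) by two explicit passes: a forward scan locating the first end-time match and the prefix it bounds, then a backward scan over that prefix for the last start-time match.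
import Mathlib
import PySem

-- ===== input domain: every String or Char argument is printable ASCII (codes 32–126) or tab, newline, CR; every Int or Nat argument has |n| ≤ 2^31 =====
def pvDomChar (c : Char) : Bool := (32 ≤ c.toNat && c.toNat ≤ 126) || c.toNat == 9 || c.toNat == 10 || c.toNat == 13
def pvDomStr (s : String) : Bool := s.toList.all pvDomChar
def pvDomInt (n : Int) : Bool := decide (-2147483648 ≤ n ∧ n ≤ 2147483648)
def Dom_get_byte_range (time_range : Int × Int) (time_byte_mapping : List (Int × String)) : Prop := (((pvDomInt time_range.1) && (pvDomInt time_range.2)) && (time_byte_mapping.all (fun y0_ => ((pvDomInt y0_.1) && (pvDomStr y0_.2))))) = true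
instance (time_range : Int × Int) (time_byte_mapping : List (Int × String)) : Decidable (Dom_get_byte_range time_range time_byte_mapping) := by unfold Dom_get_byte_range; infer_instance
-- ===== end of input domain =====

-- B replaces A's single interleaved break-driven loop by two explicit passes
-- (forward scan for the end match bounding a pfx, backward scan of that
-- pfx for the start match); alternative decomposition, same cost.

-- ===== PORT A =====
-- the for-loop of A: carries bytes_start/bytes_end, break on end match
def pvGoA (time_start time_end : String) (bytes_start bytes_end : Int) :
    List (Int × String) → Int × Int
  | [] => (bytes_start, bytes_end)
  | t :: rest =>
    let bytes_start' := if time_start == t.2 then t.1 else bytes_start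
    if time_end == t.2 then (bytes_start', t.1)
    else pvGoA time_start time_end bytes_start' bytes_end rest

def get_byte_range (time_range : Int × Int) (time_byte_mapping : List (Int × String)) : Int × Int :=
  pvGoA (PySem.Int.toStr time_range.1) (PySem.Int.toStr time_range.2) (-1) (-1) time_byte_mapping

-- ===== PORT B =====
-- pass 1 of B: first index/offset whose time equals time_end (enumerate + break)
def pvFindEndB (time_end : String) : List (Int × String) → Nat → Option (Nat × Int)
  | [], _ => none
  | t :: rest, i => if t.2 == time_end then some (i, t.1) else pvFindEndB time_end rest (i + 1)

-- pass 2 of B: first match scanning the (already reversed) pfx, break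
def pvLastStartB (time_start : String) : List (Int × String) → Int
  | [] => -1
  | t :: rest => if t.2 == time_start then t.1 else pvLastStartB time_start rest

def get_byte_range_alt (time_range : Int × Int) (time_byte_mapping : List (Int × String)) : Int × Int :=
  let time_start := PySem.Int.toStr time_range.1
  let time_end := PySem.Int.toStr time_range.2
  -- pfx := time_byte_mapping[:i+1] on a found end (take, since i+1 ≥ 0), else the whole list
  let (bytes_end, pfx) :=
    match pvFindEndB time_end time_byte_mapping 0 with
    | none => ((-1 : Int), time_byte_mapping)
    | some (i, b) => (b, time_byte_mapping.take (i + 1))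
  (pvLastStartB time_start pfx.reverse, bytes_end)

-- ===== PRECONDITION & SPEC =====
def Spec_get_byte_range (time_range : Int × Int) (time_byte_mapping : List (Int × String)) (out : Int × Int) : Prop := out = get_byte_range_alt time_range time_byte_mapping
instance (time_range : Int × Int) (time_byte_mapping : List (Int × String)) (out : Int × Int) : Decidable (Spec_get_byte_range time_range time_byte_mapping out) := by unfold Spec_get_byte_range; infer_instance

-- ===== CLAIM (what is proved, stated in full; the proofs are below) =====
def Claim_equal_get_byte_range : Prop := ∀ (time_range : Int × Int) (time_byte_mapping : List (Int × String)), Dom_get_byte_range time_range time_byte_mapping → Spec_get_byte_range time_range time_byte_mapping (get_byte_range time_range time_byte_mapping)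

-- ===== LEMMAS AND PROOFS =====

-- pvLastStartB with an arbitrary default (A's running bytes_start)
def pvLastD (time_start : String) (d : Int) : List (Int × String) → Int
  | [] => d
  | t :: rest => if t.2 == time_start then t.1 else pvLastD time_start d rest

theorem pvLastD_neg_one (ts : String) (l : List (Int × String)) :
    pvLastD ts (-1) l = pvLastStartB ts l := by
  induction l with
  | nil => rfl
  | cons t rest ih => simp [pvLastD, pvLastStartB, ih]

theorem pvLastD_append (ts : String) (d : Int) (l l' : List (Int × String)) :
    pvLastD ts d (l ++ l') = pvLastD ts (pvLastD ts d l') l := by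
  induction l with
  | nil => rfl
  | cons t rest ih => simp [pvLastD, ih]

theorem pvFindEndB_shift (te : String) (l : List (Int × String)) (i : Nat) :
    pvFindEndB te l i = (pvFindEndB te l 0).map (fun p => (p.1 + i, p.2)) := by
  induction l generalizing i with
  | nil => rfl
  | cons t rest ih =>
    by_cases h : (t.2 == te) = true
    · simp [pvFindEndB, h]
    · simp only [pvFindEndB, h, if_neg, Bool.false_eq_true, not_false_eq_true]
      rw [ih (i + 1), ih 1]
      cases pvFindEndB te rest 0 with
      | none => rfl
      | some p => simp [Option.map]; omega

theorem pvGoA_eq (ts te : String) (m : List (Int × String)) : ∀ (bs : Int),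
    pvGoA ts te bs (-1) m =
      match pvFindEndB te m 0 with
      | none => (pvLastD ts bs m.reverse, -1)
      | some (i, b) => (pvLastD ts bs ((m.take (i + 1)).reverse), b) := by
  induction m with
  | nil => intro bs; rfl
  | cons t rest ih =>
    intro bs
    have hstart : (if (ts == t.2) = true then t.1 else bs)
        = (if (t.2 == ts) = true then t.1 else bs) := by
      simp only [beq_iff_eq]
      by_cases h : ts = t.2
      · simp [h]
      · rw [if_neg h, if_neg (fun hh => h hh.symm)]
    by_cases hend : (te == t.2) = true
    · have hend' : (t.2 == te) = true := by
        simp only [beq_iff_eq] at hend ⊢; exact hend.symm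
      simp [pvGoA, pvFindEndB, hend, hend', pvLastD]
      by_cases h : ts = t.2
      · simp [h]
      · rw [if_neg h, if_neg (fun hh => h hh.symm)]
    · have hend' : (t.2 == te) = false := by
        rw [beq_eq_false_iff_ne]
        simp only [beq_iff_eq] at hend
        exact fun hh => hend hh.symm
      simp only [pvGoA, pvFindEndB, hend, hend', Bool.false_eq_true, if_false]
      rw [ih (if ts == t.2 then t.1 else bs)]
      rw [pvFindEndB_shift te rest 1]
      cases hf : pvFindEndB te rest 0 with
      | none =>
        simp only [Option.map_none]
        have : (t :: rest).reverse = rest.reverse ++ [t] := by simp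
        rw [this, pvLastD_append]
        simp only [pvLastD]
        rw [hstart]
      | some p =>
        simp only [Option.map_some]
        have htake : (t :: rest).take (p.1 + 1 + 1) = t :: rest.take (p.1 + 1) := by rfl
        have : ((t :: rest).take (p.1 + 1 + 1)).reverse = (rest.take (p.1 + 1)).reverse ++ [t] := by
          rw [htake]; simp
        rw [this, pvLastD_append]
        simp only [pvLastD]
        rw [hstart]

-- ===== VERDICT (by name: the statement is the Claim_ definition above) =====
theorem get_byte_range_spec : Claim_equal_get_byte_range := by
  intro tr m _
  unfold Spec_get_byte_range get_byte_range get_byte_range_alt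
  rw [pvGoA_eq]
  cases hf : pvFindEndB (PySem.Int.toStr tr.2) m 0 with
  | none => simp [hf, pvLastD_neg_one]
  | some p => simp [hf, pvLastD_neg_one]
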